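-- pv_equiv track=rewrite | github.com/JasurbekNURBOYEV/ukki | lms_api/tools.py | shifr
-- ===== SOURCE A (Python) =====
-- def shifr(s, k, n):
-- 	st=""
-- 	for i in range(len(str(s))):
-- 		a=ord(s[i])
-- 		x=k
-- 		res=1
-- 		while(x!=0):
-- 			res=(res*a)%n
-- 			x=x-1
-- 		st+=str(res)+'.'
-- 	st=st[:-1]
-- 	return st
-- ===== SOURCE B (Python) =====
-- def shifr(s, k, n):
--     return '.'.join(str(pow(ord(c), k, n)) for c in s)
-- ===== Notes on version B (the rewrite author's own statement) =====
-- stated objective: faster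
-- what changed: Replaces the per-character while-loop that multiplies k times (and the build-string-then-chop-trailing-dot assembly) with built-in three-argument pow for modular exponentiation and a single str.join.
-- intended difference: When k = 0 and n = 1 or n < 0 (and s is non-empty), A returns '1' for every character because its loop body never applies the modulus, while B returns str(1 % n) (e.g. 0 for n = 1), the actual value of ord(c)**0 mod n, which is the intended result. — e.g. on shifr("a", 0, 1): A returns "1", B returns "0"
-- outside the precondition, e.g. on shifr('ab', 0, 0): A returns '1.1', B raises ValueError
import Mathlib
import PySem

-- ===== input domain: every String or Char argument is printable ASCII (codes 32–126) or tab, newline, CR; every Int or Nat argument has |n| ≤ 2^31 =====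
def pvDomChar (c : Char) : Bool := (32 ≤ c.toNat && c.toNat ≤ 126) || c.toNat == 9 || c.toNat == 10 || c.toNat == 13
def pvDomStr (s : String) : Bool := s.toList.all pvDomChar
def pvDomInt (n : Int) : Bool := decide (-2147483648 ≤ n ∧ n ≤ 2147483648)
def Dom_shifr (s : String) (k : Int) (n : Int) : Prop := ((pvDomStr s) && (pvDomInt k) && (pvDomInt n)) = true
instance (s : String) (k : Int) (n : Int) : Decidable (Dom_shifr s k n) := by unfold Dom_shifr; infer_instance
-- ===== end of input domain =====

-- B replaces A's per-character multiply-k-times loop (and append-then-chop string assembly)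
-- with built-in modular exponentiation pow(a, k, n) and a single '.'-join; measured faster.


-- ===== PORT A =====
-- while(x!=0): res=(res*a)%n; x=x-1  — counted down x times; Pre_ gives 0 ≤ k when the loop
-- is reached (for k < 0 the Python loop never terminates, so those inputs are outside Pre_).
def shifrPow (a n : Int) : Nat → Int → Int
  | 0, res => res
  | m + 1, res => shifrPow a n m (PySem.Int.mod (res * a) n)

def shifr (s : String) (k : Int) (n : Int) : String :=
  -- for i in range(len(str(s))): a = ord(s[i]); x = k; res = 1; while…; st += str(res) + '.'
  -- (str(s) is s itself; s[i] is always in range here, so pyGetD with any default is exact);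
  -- finally st = st[:-1]
  String.mk (PySem.List.slice
    ((PySem.List.pyRange 0 (PySem.List.len s.toList) 1).foldl
      (fun st i =>
        st ++ (PySem.Int.toChars
                (shifrPow ((PySem.List.pyGetD s.toList i ' ').toNat : Int) n k.toNat 1)
               ++ ['.'])) ([] : List Char))
    none (some (-1)))

-- ===== PORT B =====
def shifr_alt (s : String) (k : Int) (n : Int) : String :=
  -- '.'.join(str(pow(ord(c), k, n)) for c in s); pow(a,k,n) is PySem.Int.powMod
  -- (k.toNat is exact on Pre_'s 0 ≤ k; for k < 0 or n = 0 Python's pow raises, outside Pre_)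
  String.mk (PySem.Chars.join ['.']
    (s.toList.map (fun c => PySem.Int.toChars (PySem.Int.powMod (c.toNat : Int) k.toNat n))))

-- ===== PRECONDITION & SPEC =====
-- Pre_ excludes, for non-empty s only (on s = "" neither program enters the loop and both return ""),
-- k < 0 (A's while-loop never terminates) and n = 0 (A raises ZeroDivisionError when k > 0;
-- when k = 0 A returns all-1s but B's pow(a, 0, 0) raises ValueError).
def Pre_shifr (s : String) (k : Int) (n : Int) : Prop := s = "" ∨ (0 ≤ k ∧ n ≠ 0)
instance (s : String) (k : Int) (n : Int) : Decidable (Pre_shifr s k n) := by unfold Pre_shifr; infer_instance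
def pvWitness_shifr : String × Int × Int := ("ab", 3, 5)

-- When k = 0 and n = 1 or n < 0 (s non-empty), A returns "1" per character (its loop body never
-- applies the modulus) while B returns str(1 % n) — e.g. "0" for n = 1 — the actual value of
-- ord(c)**0 mod n, which is the intended result.
def D_shifr (s : String) (k : Int) (n : Int) : Prop := k = 0 ∧ (n = 1 ∨ n < 0) ∧ s ≠ ""
instance (s : String) (k : Int) (n : Int) : Decidable (D_shifr s k n) := by unfold D_shifr; infer_instance
def Spec_shifr (s : String) (k : Int) (n : Int) (out : String) : Prop := ¬ D_shifr s k n → out = shifr_alt s k n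
instance (s : String) (k : Int) (n : Int) (out : String) : Decidable (Spec_shifr s k n out) := by unfold Spec_shifr; infer_instance
def pvDiffWitness_shifr : String × Int × Int := ("a", 0, 1)
def pvDiffWitnessOut_shifr : String × String := ("1", "0")

-- ===== CLAIM (what is proved, stated in full; the proofs are below) =====
def Claim_unchanged_shifr : Prop := ∀ (s : String) (k : Int) (n : Int), Dom_shifr s k n → Pre_shifr s k n → Spec_shifr s k n (shifr s k n)
def Claim_changed_shifr : Prop := Dom_shifr (pvDiffWitness_shifr.1) (pvDiffWitness_shifr.2.1) (pvDiffWitness_shifr.2.2) ∧ Pre_shifr (pvDiffWitness_shifr.1) (pvDiffWitness_shifr.2.1) (pvDiffWitness_shifr.2.2) ∧ D_shifr (pvDiffWitness_shifr.1) (pvDiffWitness_shifr.2.1) (pvDiffWitness_shifr.2.2) ∧ shifr (pvDiffWitness_shifr.1) (pvDiffWitness_shifr.2.1) (pvDiffWitness_shifr.2.2) = pvDiffWitnessOut_shifr.1 ∧ shifr_alt (pvDiffWitness_shifr.1) (pvDiffWitness_shifr.2.1) (pvDiffWitness_shifr.2.2) = pvDiffWitnessOut_shifr.2 ∧ pvDiffWitnessOut_shifr.1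 ≠ pvDiffWitnessOut_shifr.2
def Claim_exact_shifr : Prop := ∀ (s : String) (k : Int) (n : Int), Dom_shifr s k n → Pre_shifr s k n → D_shifr s k n → shifr s k n ≠ shifr_alt s k n

-- ===== LEMMAS AND PROOFS =====

-- A's inner loop computes (r * a^m) % n (Python %, i.e. Int.fmod) once it has run ≥ 1 step.
lemma shifrPow_eq (a n : Int) : ∀ (m : Nat) (r : Int),
    shifrPow a n (m + 1) r = PySem.Int.mod (r * a ^ (m + 1)) n := by
  intro m
  induction m with
  | zero => intro r; simp [shifrPow, PySem.Int.mod]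
  | succ m ih =>
    intro r
    show shifrPow a n (m + 1) (PySem.Int.mod (r * a) n) = _
    rw [ih]
    show ((r * a).fmod n * a ^ (m + 1)).fmod n = (r * a ^ (m + 1 + 1)).fmod n
    rw [Int.mul_fmod, Int.fmod_fmod_of_dvd _ (dvd_refl n), ← Int.mul_fmod]
    ring_nf

-- flatMap of token-plus-dot equals the dot-join plus one trailing dot, on a non-empty list.
lemma flatMap_dot_eq_join (t : Char → List Char) :
    ∀ (c : Char) (cs : List Char),
      (c :: cs).flatMap (fun c => t c ++ ['.']) =
        PySem.Chars.join ['.'] ((c :: cs).map t) ++ ['.'] := by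
  intro c cs
  induction cs generalizing c with
  | nil => simp [PySem.Chars.join_singleton]
  | cons c' cs ih =>
    rw [List.flatMap_cons, ih c']
    simp only [List.map_cons, PySem.Chars.join_cons_cons]
    simp [List.append_assoc]

lemma one_fmod_of_two_le (n : Int) (h : 2 ≤ n) : PySem.Int.mod 1 n = 1 := by
  rw [PySem.Int.mod_eq_emod_of_pos (by omega : (0:Int) < n)]
  exact Int.emod_eq_of_lt (by omega) (by omega)

-- A on a non-empty string is the dot-join of its inner-loop tokens.
lemma shifr_eq_join (s : String) (k n : Int) (c : Char) (cs : List Char)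
    (hcs : s.toList = c :: cs) :
    shifr s k n = String.mk (PySem.Chars.join ['.']
      ((c :: cs).map (fun c => PySem.Int.toChars (shifrPow ((c.toNat : Int)) n k.toNat 1)))) := by
  unfold shifr
  rw [PySem.List.foldl_append_eq_flatMap, List.nil_append]
  have hmap : (PySem.List.pyRange 0 (PySem.List.len s.toList) 1).flatMap
      (fun i => PySem.Int.toChars (shifrPow ((PySem.List.pyGetD s.toList i ' ').toNat : Int) n k.toNat 1) ++ ['.'])
      = s.toList.flatMap
      (fun c => PySem.Int.toChars (shifrPow ((c.toNat : Int)) n k.toNat 1) ++ ['.']) := by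
    rw [List.flatMap_def, List.flatMap_def]
    congr 1
    calc (PySem.List.pyRange 0 (PySem.List.len s.toList) 1).map
            (fun i => PySem.Int.toChars (shifrPow ((PySem.List.pyGetD s.toList i ' ').toNat : Int) n k.toNat 1) ++ ['.'])
        = ((PySem.List.pyRange 0 (PySem.List.len s.toList) 1).map
            (fun j => PySem.List.pyGetD s.toList j ' ')).map
            (fun c => PySem.Int.toChars (shifrPow ((c.toNat : Int)) n k.toNat 1) ++ ['.']) := by
          rw [List.map_map]
          rfl
      _ = s.toList.map (fun c => PySem.Int.toChars (shifrPow ((c.toNat : Int)) n k.toNat 1) ++ ['.']) := by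
          rw [PySem.List.map_pyGetD_pyRange_zero s.toList ' ']
  rw [hcs] at hmap
  rw [hcs, hmap, flatMap_dot_eq_join, PySem.List.slice_to_neg_one, List.dropLast_concat]

-- the head of a dot-join of a non-empty first token is that token's head
lemma head?_join_cons (p : List Char) (rest : List (List Char)) (hp : p ≠ []) :
    (PySem.Chars.join ['.'] (p :: rest)).head? = p.head? := by
  cases rest with
  | nil => rw [PySem.Chars.join_singleton]
  | cons q rest =>
    rw [PySem.Chars.join_cons_cons, List.append_assoc, List.head?_append]
    cases p with
    | nil => exact absurd rfl hp
    | cons x xs => rfl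

lemma toList_mk (xs : List Char) : (String.mk xs).toList = xs := (String.ofList_eq.mp rfl).symm

lemma toChars_ne_nil_of_nonpos (m : Int) (hm : m ≤ 0) : PySem.Int.toChars m ≠ [] := by
  rcases lt_or_eq_of_le hm with h | h
  · simp [PySem.Int.toChars, h]
  · subst h; decide

lemma head_toChars_ne_one (m : Int) (hm : m ≤ 0) : (PySem.Int.toChars m).head? ≠ some '1' := by
  rcases lt_or_eq_of_le hm with h | h
  · simp [PySem.Int.toChars, h]
  · subst h; decide

-- ===== VERDICT (by name: the statement is the Claim_ definition above) =====
theorem shifr_spec : Claim_unchanged_shifr := by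
  intro s k n _hdom hpre hnd
  cases hcs : s.toList with
  | nil =>
    have hs : s = "" := String.toList_eq_nil_iff.mp hcs
    subst hs
    unfold shifr shifr_alt
    simp [PySem.List.pyRange, PySem.List.len, PySem.Chars.join, PySem.List.slice]
    rfl
  | cons c cs =>
    have hs : s ≠ "" := by
      intro h
      rw [h] at hcs
      simp at hcs
    obtain ⟨hk, hn0⟩ : 0 ≤ k ∧ n ≠ 0 := by
      rcases hpre with h | h
      · exact absurd h hs
      · exact h
    rw [shifr_eq_join s k n c cs hcs]
    -- each token agrees: shifrPow a n k.toNat 1 = powMod a k.toNat n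
    have hpow : ∀ a : Int, shifrPow a n k.toNat 1 = PySem.Int.powMod a k.toNat n := by
      intro a
      rcases Nat.eq_zero_or_pos k.toNat with h0 | hpos
      · -- k = 0: A's loop runs zero times, res = 1; powMod a 0 n = 1 % n = 1 since n ≥ 2 here
        have hk0 : k = 0 := by omega
        have hnD : ¬ (n = 1 ∨ n < 0) := by
          intro h
          exact hnd (show D_shifr s k n from ⟨hk0, h, hs⟩)
        have hn2 : 2 ≤ n := by omega
        rw [h0]
        show (1 : Int) = PySem.Int.mod (a ^ 0) n
        rw [pow_zero, one_fmod_of_two_le n hn2]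
      · obtain ⟨m, hm⟩ : ∃ m, k.toNat = m + 1 := ⟨k.toNat - 1, by omega⟩
        rw [hm, shifrPow_eq, one_mul]
        rfl
    unfold shifr_alt
    rw [hcs]
    simp only [hpow]

theorem shifr_changed : Claim_changed_shifr := by
  unfold Claim_changed_shifr; decide

theorem shifr_tight : Claim_exact_shifr := by
  intro s k n _hdom _hpre hD heq
  obtain ⟨hk0, hn1, hs⟩ : k = 0 ∧ (n = 1 ∨ n < 0) ∧ s ≠ "" := hD
  cases hcs : s.toList with
  | nil => exact hs (String.toList_eq_nil_iff.mp hcs)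
  | cons c cs =>
    -- B's first token is str(1 % n) with 1 % n ≤ 0, A's is "1": the heads differ
    have hm0 : ∀ a : Int, PySem.Int.powMod a k.toNat n ≤ 0 := by
      intro a
      subst hk0
      show PySem.Int.mod (a ^ (0 : Int).toNat) n ≤ 0
      rw [show ((0 : Int).toNat) = 0 from rfl, pow_zero]
      rcases hn1 with h | h
      · subst h; decide
      · exact (PySem.Int.mod_neg_bounds 1 h).2
    rw [shifr_eq_join s k n c cs hcs] at heq
    unfold shifr_alt at heq
    rw [hcs] at heq
    have heads := congrArg (fun t => t.toList.head?) heq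
    simp only [toList_mk] at heads
    have hA : shifrPow ((c.toNat : Int)) n k.toNat 1 = 1 := by
      subst hk0; rfl
    rw [List.map_cons, List.map_cons, hA,
        head?_join_cons _ _ (by decide : PySem.Int.toChars 1 ≠ []),
        head?_join_cons _ _ (toChars_ne_nil_of_nonpos _ (hm0 (c.toNat : Int)))] at heads
    have : (PySem.Int.toChars 1).head? = some '1' := by decide
    rw [this] at heads
    exact head_toChars_ne_one _ (hm0 (c.toNat : Int)) heads.symm
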